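-- pv_equiv track=rewrite | github.com/austinemble/youtube-downloader | utils/youtube_handler.py | is_youtube_url
-- ===== SOURCE A (Python) =====
-- def is_youtube_url(url: str) -> bool:
--     """Check if URL is a valid YouTube URL"""
--     youtube_patterns = [
--         'youtube.com/watch',
--         'youtube.com/playlist',
--         'youtu.be/',
--         'youtube.com/shorts/',
--     ]
--     return any(pattern in url for pattern in youtube_patterns)
-- ===== SOURCE B (Python) =====
-- def is_youtube_url(url: str) -> bool:
--     """Check if URL is a valid YouTube URL"""
--     patterns = (
--         'youtube.com/watch',
--         'youtube.com/playlist',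
--         'youtu.be/',
--         'youtube.com/shorts/',
--     )
--     for i in range(len(url)):
--         if url.startswith(patterns, i):
--             return True
--     return False
-- ===== Notes on version B (the rewrite author's own statement) =====
-- stated objective: alternative
-- what changed: Replaces four independent membership substring searches with a single left-to-right scan that, at each starting position, tests all patterns at once via tuple-startswith and returns as soon as one matches.
import Mathlib
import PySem

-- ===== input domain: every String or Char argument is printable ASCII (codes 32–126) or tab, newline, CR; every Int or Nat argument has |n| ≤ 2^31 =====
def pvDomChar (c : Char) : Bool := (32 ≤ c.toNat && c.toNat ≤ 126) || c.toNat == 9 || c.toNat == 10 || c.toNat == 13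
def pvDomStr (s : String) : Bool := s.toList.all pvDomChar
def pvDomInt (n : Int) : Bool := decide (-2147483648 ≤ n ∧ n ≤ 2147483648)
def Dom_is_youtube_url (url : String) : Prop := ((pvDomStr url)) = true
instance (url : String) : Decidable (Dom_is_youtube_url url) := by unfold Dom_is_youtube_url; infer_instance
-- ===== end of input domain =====

-- B replaces A's four independent substring searches by one left-to-right scan testing all
-- patterns at each position (alternative decomposition, same asymptotic cost).

-- ===== PORT A =====
-- A: any(pattern in url for pattern in youtube_patterns)
def pvPatternsA : List String :=
  ["youtube.com/watch", "youtube.com/playlist", "youtu.be/", "youtube.com/shorts/"]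

def is_youtube_url (url : String) : Bool :=
  pvPatternsA.any (fun pattern => PySem.Str.isIn pattern url)

-- ===== PORT B =====
-- B: for i in range(len(url)): if url.startswith(patterns, i): return True; return False
def pvPatternsB : List (List Char) :=
  ["youtube.com/watch".toList, "youtube.com/playlist".toList,
   "youtu.be/".toList, "youtube.com/shorts/".toList]

-- the scan over successive suffixes of url (position i ↦ the i-th suffix)
def pvScan (pats : List (List Char)) : List Char → Bool
  | [] => false
  | c :: rest =>
      if pats.any (fun p => PySem.Chars.startswith (c :: rest) p) then true
      else pvScan pats rest

def is_youtube_url_alt (url : String) : Bool :=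
  pvScan pvPatternsB url.toList

-- ===== PRECONDITION & SPEC =====
def Spec_is_youtube_url (url : String) (out : Bool) : Prop := out = is_youtube_url_alt url
instance (url : String) (out : Bool) : Decidable (Spec_is_youtube_url url out) := by unfold Spec_is_youtube_url; infer_instance

-- ===== CLAIM (what is proved, stated in full; the proofs are below) =====
def Claim_equal_is_youtube_url : Prop := ∀ (url : String), Dom_is_youtube_url url → Spec_is_youtube_url url (is_youtube_url url)

-- ===== LEMMAS AND PROOFS =====

-- the scan finds exactly the nonempty patterns occurring as an infix
lemma pvScan_iff (pats : List (List Char)) (hne : ∀ p ∈ pats, p ≠ []) :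
    ∀ cs : List Char, pvScan pats cs = true ↔ ∃ p ∈ pats, p <:+: cs := by
  intro cs
  induction cs with
  | nil =>
      simp only [pvScan]
      constructor
      · intro h; exact absurd h (by simp)
      · rintro ⟨p, hp, hinf⟩
        exact absurd (List.eq_nil_of_infix_nil hinf) (hne p hp)
  | cons c rest ih =>
      simp only [pvScan]
      by_cases h : pats.any (fun p => PySem.Chars.startswith (c :: rest) p) = true
      · rw [if_pos h]; simp only [true_iff]
        obtain ⟨p, hp, hsw⟩ := List.any_eq_true.mp h
        exact ⟨p, hp, ((PySem.Chars.startswith_iff _ _).mp hsw).isInfix⟩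
      · rw [if_neg h, ih]
        constructor
        · rintro ⟨p, hp, hinf⟩; exact ⟨p, hp, hinf.trans (List.suffix_cons c rest).isInfix⟩
        · rintro ⟨p, hp, hinf⟩
          rcases List.infix_cons_iff.mp hinf with hpre | hinf'
          · exact absurd (List.any_eq_true.mpr
              ⟨p, hp, (PySem.Chars.startswith_iff _ _).mpr hpre⟩) h
          · exact ⟨p, hp, hinf'⟩

-- ===== VERDICT (by name: the statement is the Claim_ definition above) =====
theorem is_youtube_url_spec : Claim_equal_is_youtube_url := by
  intro url _
  unfold Spec_is_youtube_url is_youtube_url is_youtube_url_alt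
  rw [Bool.eq_iff_iff, List.any_eq_true,
      pvScan_iff pvPatternsB (by decide) url.toList]
  constructor
  · rintro ⟨p, hp, hin⟩
    refine ⟨p.toList, ?_, (PySem.Str.isIn_iff_infix _ _).mp hin⟩
    fin_cases hp <;> simp [pvPatternsB]
  · rintro ⟨p, hp, hinf⟩
    fin_cases hp <;>
      exact ⟨_, by simp [pvPatternsA], (PySem.Str.isIn_iff_infix _ _).mpr hinf⟩
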